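-- pv_equiv track=rewrite | github.com/RishijManna/PGIP | my_app/services/ai_assistant.py | query_mentions_generic_portal
-- ===== SOURCE A (Python) =====
-- def normalize_text(text):
--     return str(text or "").strip()
--
-- def query_mentions_generic_portal(query):
--     text = normalize_text(query).lower()
--     return any(
--         term in text
--         for term in [
--             "portal",
--             "portals",
--             "website",
--             "websites",
--             "government portal",
--             "job site",
--             "job sites",
--             "where should i search",
--             "where can i apply",
--         ]
--     )
-- ===== SOURCE B (Python) =====
-- _KEYWORDS = ("portal", "website", "job site", "where should i search", "where can i apply")
-- # Longer phrases of A's list ("portals", "websites", "government portal", "job sites")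
-- # all contain one of these, so one prefix test per position suffices.
--
-- def query_mentions_generic_portal(query):
--     text = str(query or "").strip().lower()
--     for i in range(len(text)):
--         for kw in _KEYWORDS:
--             if text.startswith(kw, i):
--                 return True
--     return False
-- ===== Notes on version B (the rewrite author's own statement) =====
-- stated objective: alternative
-- what changed: B replaces A's nine separate 'term in text' substring scans by a single left-to-right scan over the text positions that tests, at each position, whether one of five minimal keywords starts there; A's four longer keywords are dropped because each contains one of the five as a substring.
import Mathlib
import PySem

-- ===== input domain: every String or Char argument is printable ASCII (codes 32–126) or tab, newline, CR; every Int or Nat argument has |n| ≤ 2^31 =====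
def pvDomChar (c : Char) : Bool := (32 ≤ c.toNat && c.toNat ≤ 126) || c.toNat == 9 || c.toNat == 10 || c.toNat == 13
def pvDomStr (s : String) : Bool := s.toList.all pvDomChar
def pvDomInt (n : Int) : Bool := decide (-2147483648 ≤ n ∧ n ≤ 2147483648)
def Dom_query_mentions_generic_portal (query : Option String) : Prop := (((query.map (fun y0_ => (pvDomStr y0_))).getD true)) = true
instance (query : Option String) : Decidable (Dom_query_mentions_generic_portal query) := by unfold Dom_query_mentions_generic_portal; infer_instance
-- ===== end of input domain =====

-- B replaces A's nine per-keyword substring scans by a single scan of the text testing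
-- five minimal keywords as prefixes at each position (alternative decomposition, same result).


-- ===== PORT A =====
-- normalize_text(query).lower(); 'query or ""' coincides with getD "" since str(None or "") = "" = str("" or "")
def pvNormalizeLower (query : Option String) : String :=
  PySem.Str.lower (PySem.Str.strip (query.getD ""))

def query_mentions_generic_portal (query : Option String) : Bool :=
  let text := pvNormalizeLower query
  ["portal", "portals", "website", "websites", "government portal",
   "job site", "job sites", "where should i search", "where can i apply"].any
    (fun term => PySem.Str.isIn term text)

-- ===== PORT B =====
def pvKeywords : List (List Char) :=
  ["portal".toList, "website".toList, "job site".toList,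
   "where should i search".toList, "where can i apply".toList]

-- the position loop of Source B: at each suffix, test whether some keyword is a prefix
def pvScan (cs : List Char) : Bool :=
  match cs with
  | [] => false
  | _ :: t => pvKeywords.any (fun kw => kw.isPrefixOf cs) || pvScan t

def query_mentions_generic_portal_alt (query : Option String) : Bool :=
  pvScan (pvNormalizeLower query).toList

-- ===== PRECONDITION & SPEC =====
def Spec_query_mentions_generic_portal (query : Option String) (out : Bool) : Prop := out = query_mentions_generic_portal_alt query
instance (query : Option String) (out : Bool) : Decidable (Spec_query_mentions_generic_portal query out) := by unfold Spec_query_mentions_generic_portal; infer_instance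

-- ===== CLAIM (what is proved, stated in full; the proofs are below) =====
def Claim_equal_query_mentions_generic_portal : Prop := ∀ (query : Option String), Dom_query_mentions_generic_portal query → Spec_query_mentions_generic_portal query (query_mentions_generic_portal query)

-- ===== LEMMAS AND PROOFS =====

-- pvScan finds exactly the texts in which some minimal keyword occurs as an infix
theorem pvScan_iff (cs : List Char) : pvScan cs = true ↔ ∃ kw ∈ pvKeywords, kw <:+: cs := by
  induction cs with
  | nil => simp [pvScan, pvKeywords]
  | cons a t ih =>
    simp only [pvScan, Bool.or_eq_true, List.any_eq_true, ih,
      List.isPrefixOf_iff_prefix, List.infix_cons_iff]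
    constructor
    · rintro (⟨kw, hkw, hp⟩ | ⟨kw, hkw, hi⟩)
      · exact ⟨kw, hkw, Or.inl hp⟩
      · exact ⟨kw, hkw, Or.inr hi⟩
    · rintro ⟨kw, hkw, (hp | hi)⟩
      · exact Or.inl ⟨kw, hkw, hp⟩
      · exact Or.inr ⟨kw, hkw, hi⟩

-- the nine-term membership test of A equals the five-keyword scan of B, on any text
theorem pvNine_eq_scan (t : String) :
    (["portal", "portals", "website", "websites", "government portal",
      "job site", "job sites", "where should i search", "where can i apply"].any
       (fun term => PySem.Str.isIn term t)) = pvScan t.toList := by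
  rw [Bool.eq_iff_iff, pvScan_iff]
  simp only [List.any_eq_true, PySem.Str.isIn_iff_infix, pvKeywords,
    List.mem_cons, exists_eq_or_imp, exists_eq_left,
    List.not_mem_nil, or_false]
  constructor
  · rintro (h | h | h | h | h | h | h | h | h)
    · exact Or.inl h
    · exact Or.inl ((by decide : "portal".toList <:+: "portals".toList).trans h)
    · exact Or.inr (Or.inl h)
    · exact Or.inr (Or.inl ((by decide : "website".toList <:+: "websites".toList).trans h))
    · exact Or.inl ((by decide : "portal".toList <:+: "government portal".toList).trans h)
    · exact Or.inr (Or.inr (Or.inl h))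
    · exact Or.inr (Or.inr (Or.inl ((by decide : "job site".toList <:+: "job sites".toList).trans h)))
    · exact Or.inr (Or.inr (Or.inr (Or.inl h)))
    · exact Or.inr (Or.inr (Or.inr (Or.inr h)))
  · rintro (h | h | h | h | h)
    · exact Or.inl h
    · exact Or.inr (Or.inr (Or.inl h))
    · exact Or.inr (Or.inr (Or.inr (Or.inr (Or.inr (Or.inl h)))))
    · exact Or.inr (Or.inr (Or.inr (Or.inr (Or.inr (Or.inr (Or.inr (Or.inl h)))))))
    · exact Or.inr (Or.inr (Or.inr (Or.inr (Or.inr (Or.inr (Or.inr (Or.inr h)))))))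

-- ===== VERDICT (by name: the statement is the Claim_ definition above) =====
theorem query_mentions_generic_portal_spec : Claim_equal_query_mentions_generic_portal := by
  intro query _
  show _ = _
  unfold query_mentions_generic_portal query_mentions_generic_portal_alt
  exact pvNine_eq_scan (pvNormalizeLower query)
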